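-- pv_equiv track=rewrite | github.com/np-devops-team1/DevOps_Main | main.py | calculate_hwy_score
-- ===== SOURCE A (Python) =====
-- def calculate_hwy_score(buildings_tracker):
--     hwy_score = 0
--     all_hwy_score = []
--
--     for building_row in range(0, len(buildings_tracker)):
--         for building_column in range(0, len(buildings_tracker[building_row])):
--             build = buildings_tracker[building_row][building_column]
--
--             if build == "HWY":
--                 score = 0
--                 # Find the number of rows
--                 for i in range(building_column, len(buildings_tracker[building_row])):
--                     if buildings_tracker[building_row][i] == "HWY":
--                         score = score + 1
--                     else:
--                         break
--                 for i in reversed(range(0, building_column)):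
--                     if buildings_tracker[building_row][i] == "HWY":
--                         score = score + 1
--                     else:
--                         break
--                 hwy_score = hwy_score + score
--                 all_hwy_score.append(score)
--     return hwy_score, all_hwy_score
-- ===== SOURCE B (Python) =====
-- def calculate_hwy_score(buildings_tracker):
--     total = 0
--     scores = []
--     for row in buildings_tracker:
--         run = 0
--         for cell in row:
--             if cell == "HWY":
--                 run += 1
--             elif run:
--                 total += run * run
--                 scores.extend([run] * run)
--                 run = 0
--         if run:
--             total += run * run
--             scores.extend([run] * run)
--     return total, scores
-- ===== Notes on version B (the rewrite author's own statement) =====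
-- stated objective: faster
-- what changed: Per row, a single left-to-right pass finds each maximal contiguous HWY run of length L and emits L for each of its L cells (and adds L*L to the total), replacing A's per-cell forward+backward rescans.
import Mathlib
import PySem

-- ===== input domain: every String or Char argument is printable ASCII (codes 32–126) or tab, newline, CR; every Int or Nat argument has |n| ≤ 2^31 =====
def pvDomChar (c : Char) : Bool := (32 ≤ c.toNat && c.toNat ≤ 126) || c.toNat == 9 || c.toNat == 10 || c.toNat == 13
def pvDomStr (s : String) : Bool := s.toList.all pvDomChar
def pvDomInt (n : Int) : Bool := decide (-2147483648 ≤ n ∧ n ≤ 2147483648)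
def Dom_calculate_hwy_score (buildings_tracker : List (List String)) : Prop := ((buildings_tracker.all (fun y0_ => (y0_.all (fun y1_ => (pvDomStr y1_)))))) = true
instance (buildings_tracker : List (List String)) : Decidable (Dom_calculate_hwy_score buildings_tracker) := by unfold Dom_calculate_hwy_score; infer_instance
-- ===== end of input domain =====

-- B replaces A's per-cell forward+backward rescans by one pass per row keeping the current
-- HWY run length (a run of length L emits L, L times); same return value, measurably faster.

-- ===== PORT A =====
-- 'for i in range(building_column, n): if r[i]=="HWY": score += 1 else: break'
-- = count of leading "HWY" entries of r.drop building_column (indices always in range).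
def pvFwd : List String → Nat
  | [] => 0
  | x :: xs => if x = "HWY" then pvFwd xs + 1 else 0

def calculate_hwy_score (buildings_tracker : List (List String)) : Int × List Int :=
  buildings_tracker.foldl
    (fun acc row =>
      (List.range row.length).foldl
        (fun acc j =>
          if row.getD j "" = "HWY" then
            -- forward loop then backward loop ('reversed(range(0, j))' walks (row.take j).reverse)
            let score : Int := ((pvFwd (row.drop j) + pvFwd ((row.take j).reverse) : Nat) : Int)
            (acc.1 + score, acc.2 ++ [score])
          else acc)
        acc)
    (0, [])

-- ===== PORT B =====
-- one step of B's inner loop: state ((total, scores), run)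
def pvStep (st : (Int × List Int) × Nat) (cell : String) : (Int × List Int) × Nat :=
  if cell = "HWY" then (st.1, st.2 + 1)
  else if st.2 ≠ 0 then
    ((st.1.1 + ((st.2 * st.2 : Nat) : Int), st.1.2 ++ List.replicate st.2 (st.2 : Int)), 0)
  else st

-- the trailing 'if run:' flush after a row
def pvFlush (st : (Int × List Int) × Nat) : Int × List Int :=
  if st.2 ≠ 0 then
    (st.1.1 + ((st.2 * st.2 : Nat) : Int), st.1.2 ++ List.replicate st.2 (st.2 : Int))
  else st.1

def calculate_hwy_score_alt (buildings_tracker : List (List String)) : Int × List Int :=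
  buildings_tracker.foldl
    (fun acc row => pvFlush (row.foldl pvStep (acc, 0)))
    (0, [])

-- ===== PRECONDITION & SPEC =====
def Spec_calculate_hwy_score (buildings_tracker : List (List String)) (out : Int × List Int) : Prop := out = calculate_hwy_score_alt buildings_tracker
instance (buildings_tracker : List (List String)) (out : Int × List Int) : Decidable (Spec_calculate_hwy_score buildings_tracker out) := by unfold Spec_calculate_hwy_score; infer_instance

-- ===== CLAIM (what is proved, stated in full; the proofs are below) =====
def Claim_equal_calculate_hwy_score : Prop := ∀ (buildings_tracker : List (List String)), Dom_calculate_hwy_score buildings_tracker → Spec_calculate_hwy_score buildings_tracker (calculate_hwy_score buildings_tracker)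

-- ===== LEMMAS AND PROOFS =====

-- proof-side: run decomposition of a row (used to characterise both programs)
def pvSpan : List String → Nat × List String
  | [] => (0, [])
  | x :: xs => if x = "HWY" then ((pvSpan xs).1 + 1, (pvSpan xs).2) else (0, x :: xs)

theorem pvSpan_len_le : ∀ l : List String, (pvSpan l).2.length ≤ l.length
  | [] => le_refl _
  | x :: xs => by
    by_cases h : x = "HWY" <;> simp [pvSpan, h]
    · exact le_trans (pvSpan_len_le xs) (Nat.le_succ _)

-- proof-side: per-run characterisation of one row's contribution
def pvRowB : List String → Int × List Int
  | [] => (0, [])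
  | x :: xs =>
    if x = "HWY" then
      let L : Nat := (pvSpan xs).1 + 1
      let r := pvRowB (pvSpan xs).2
      (((L * L : Nat) : Int) + r.1, List.replicate L (L : Int) ++ r.2)
    else pvRowB xs
termination_by l => l.length
decreasing_by
  · exact Nat.lt_succ_of_le (pvSpan_len_le xs)
  · simp

theorem pvFwd_le (l : List String) : pvFwd l ≤ l.length := by
  induction l with
  | nil => simp [pvFwd]
  | cons x xs ih => by_cases h : x = "HWY" <;> simp [pvFwd, h] <;> omega

theorem pvFwd_append (a b : List String) :
    pvFwd (a ++ b) = if pvFwd a = a.length then a.length + pvFwd b else pvFwd a := by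
  induction a with
  | nil => simp [pvFwd]
  | cons x xs ih =>
    by_cases h : x = "HWY"
    · simp only [List.cons_append, pvFwd, h, ih, List.length_cons]
      split_ifs <;> omega
    · simp only [List.cons_append, pvFwd, h, List.length_cons]
      have hle := pvFwd_le xs
      split_ifs <;> simp_all
  
theorem pvFwd_replicate_hwy (L : Nat) (b : List String) :
    pvFwd (List.replicate L "HWY" ++ b) = L + pvFwd b := by
  induction L with
  | zero => simp
  | succ n ih => simp [List.replicate_succ, pvFwd, ih]; omega

-- A's per-cell score (the backward loop earns an extra c when the whole prefix is "HWY",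
-- modelling c "HWY" cells sitting immediately to the left of the sublist r)
def pvSc (c : Nat) (r : List String) (j : Nat) : Nat :=
  pvFwd (r.drop j) + pvFwd ((r.take j).reverse) +
    (if pvFwd ((r.take j).reverse) = j then c else 0)

-- the scores A emits on row r, given c "HWY" cells immediately to r's left
def pvG (c : Nat) (r : List String) : List Int :=
  (List.range r.length).filterMap
    (fun j => if r.getD j "" = "HWY" then some ((pvSc c r j : Nat) : Int) else none)

theorem pvG_nil (c : Nat) : pvG c [] = [] := by simp [pvG]

theorem pvG_cons_not (c : Nat) (x : String) (xs : List String) (hx : x ≠ "HWY") :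
    pvG c (x :: xs) = pvG 0 xs := by
  unfold pvG
  rw [List.length_cons, List.range_succ_eq_map,
    List.filterMap_cons_none (by rw [List.getD_cons_zero, if_neg hx]), List.filterMap_map]
  apply List.filterMap_congr
  intro j hj
  have hjlt : j < xs.length := List.mem_range.mp hj
  have htk : (xs.take j).length = j := by simp [Nat.le_of_lt hjlt]
  simp only [Function.comp_def, Nat.succ_eq_add_one, List.getD_cons_succ]
  by_cases hcell : xs.getD j "" = "HWY"
  · rw [if_pos hcell, if_pos hcell]
    congr 2
    unfold pvSc
    rw [List.drop_succ_cons, List.take_succ_cons, List.reverse_cons, pvFwd_append]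
    have hlen : ((xs.take j).reverse).length = j := by simp [htk]
    have hfx : pvFwd [x] = 0 := by simp [pvFwd, hx]
    rw [hlen, hfx]
    have hle : pvFwd ((xs.take j).reverse) ≤ j := le_of_le_of_eq (pvFwd_le _) hlen
    split_ifs <;> omega
  · rw [if_neg hcell, if_neg hcell]

theorem pvG_cons_hwy (c : Nat) (xs : List String) :
    pvG c ("HWY" :: xs) = ((pvFwd xs + 1 + c : Nat) : Int) :: pvG (c + 1) xs := by
  unfold pvG
  have h0 : pvSc c ("HWY" :: xs) 0 = pvFwd xs + 1 + c := by
    simp [pvSc, pvFwd]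
  rw [List.length_cons, List.range_succ_eq_map,
    List.filterMap_cons_some (b := ((pvSc c ("HWY" :: xs) 0 : Nat) : Int))
      (by rw [List.getD_cons_zero, if_pos rfl]),
    List.filterMap_map, h0]
  congr 1
  apply List.filterMap_congr
  intro j hj
  have hjlt : j < xs.length := List.mem_range.mp hj
  have htk : (xs.take j).length = j := by simp [Nat.le_of_lt hjlt]
  simp only [Function.comp_def, Nat.succ_eq_add_one, List.getD_cons_succ]
  by_cases hcell : xs.getD j "" = "HWY"
  · rw [if_pos hcell, if_pos hcell]
    congr 2
    unfold pvSc
    rw [List.drop_succ_cons, List.take_succ_cons, List.reverse_cons, pvFwd_append]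
    have hlen : ((xs.take j).reverse).length = j := by simp [htk]
    have hfx : pvFwd ["HWY"] = 1 := by simp [pvFwd]
    rw [hlen, hfx]
    have hle : pvFwd ((xs.take j).reverse) ≤ j := le_of_le_of_eq (pvFwd_le _) hlen
    split_ifs <;> omega
  · rw [if_neg hcell, if_neg hcell]

def pvNotHwyHead (rest : List String) : Prop :=
  rest = [] ∨ ∃ h t, rest = h :: t ∧ h ≠ "HWY"

theorem pvFwd_eq_zero (rest : List String) (h : pvNotHwyHead rest) : pvFwd rest = 0 := by
  rcases h with rfl | ⟨a, t, rfl, ha⟩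
  · simp [pvFwd]
  · simp [pvFwd, ha]

theorem pvG_run (L : Nat) (c : Nat) (rest : List String) (h : pvNotHwyHead rest) :
    pvG c (List.replicate L "HWY" ++ rest)
      = List.replicate L ((L + c : Nat) : Int) ++ pvG 0 rest := by
  induction L generalizing c with
  | zero =>
    rw [List.replicate_zero, List.replicate_zero, List.nil_append, List.nil_append]
    rcases h with rfl | ⟨a, t, rfl, ha⟩
    · rw [pvG_nil, pvG_nil]
    · rw [pvG_cons_not c a t ha, pvG_cons_not 0 a t ha]
  | succ n ih =>
    rw [List.replicate_succ, List.cons_append, pvG_cons_hwy,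
      pvFwd_replicate_hwy, pvFwd_eq_zero rest h, ih (c + 1),
      List.replicate_succ, List.cons_append]
    have e1 : n + 0 + 1 + c = n + 1 + c := by omega
    have e2 : n + (c + 1) = n + 1 + c := by omega
    rw [e1, e2]

theorem pvSpan_decomp : ∀ l : List String,
    l = List.replicate (pvSpan l).1 "HWY" ++ (pvSpan l).2 ∧ pvNotHwyHead (pvSpan l).2
  | [] => ⟨rfl, Or.inl rfl⟩
  | x :: xs => by
    by_cases h : x = "HWY"
    · have := pvSpan_decomp xs
      simp only [pvSpan, if_pos h]
      exact ⟨by rw [List.replicate_succ, List.cons_append, h]; exact congrArg _ this.1, this.2⟩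
    · simp only [pvSpan, if_neg h]
      exact ⟨rfl, Or.inr ⟨x, xs, rfl, h⟩⟩

theorem pvRowB_snd : ∀ r : List String, (pvRowB r).2 = pvG 0 r
  | [] => by rw [pvRowB, pvG_nil]
  | x :: xs => by
    by_cases h : x = "HWY"
    · subst h
      obtain ⟨hdec, hrest⟩ := pvSpan_decomp xs
      have hG : pvG 0 ("HWY" :: xs)
          = List.replicate ((pvSpan xs).1 + 1) (((pvSpan xs).1 + 1 + 0 : Nat) : Int)
              ++ pvG 0 (pvSpan xs).2 := by
        conv_lhs => rw [show ("HWY" : String) :: xs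
          = List.replicate ((pvSpan xs).1 + 1) "HWY" ++ (pvSpan xs).2 from by
            rw [List.replicate_succ, List.cons_append]; exact congrArg _ hdec]
        exact pvG_run _ 0 _ hrest
      have ht := pvRowB_snd (pvSpan xs).2
      rw [hG, pvRowB, if_pos rfl]
      simp only [Nat.add_zero, ht]
    · rw [pvRowB, if_neg h, pvG_cons_not 0 x xs h]
      exact pvRowB_snd xs
termination_by r => r.length
decreasing_by
  all_goals first
    | exact Nat.lt_succ_of_le (pvSpan_len_le xs)
    | simp

theorem pvRowB_fst : ∀ r : List String, (pvRowB r).1 = (pvRowB r).2.sum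
  | [] => by rw [pvRowB]; rfl
  | x :: xs => by
    by_cases h : x = "HWY"
    · have ht := pvRowB_fst (pvSpan xs).2
      rw [pvRowB, if_pos h]
      simp only [List.sum_append, List.sum_replicate, ht]
      push_cast
      ring
    · rw [pvRowB, if_neg h]
      exact pvRowB_fst xs
termination_by r => r.length
decreasing_by
  all_goals first
    | exact Nat.lt_succ_of_le (pvSpan_len_le xs)
    | simp

-- A's inner fold, expressed through the filterMap'd score list
theorem pvFoldRow (r : List String) (idxs : List Nat) (acc : Int × List Int) :
    idxs.foldl
      (fun acc j =>
        if r.getD j "" = "HWY" then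
          let score : Int := ((pvFwd (r.drop j) + pvFwd ((r.take j).reverse) : Nat) : Int)
          (acc.1 + score, acc.2 ++ [score])
        else acc)
      acc
    = (acc.1 + ((idxs.filterMap
          (fun j => if r.getD j "" = "HWY"
            then some (((pvFwd (r.drop j) + pvFwd ((r.take j).reverse) : Nat) : Int))
            else none)).sum),
       acc.2 ++ idxs.filterMap
          (fun j => if r.getD j "" = "HWY"
            then some (((pvFwd (r.drop j) + pvFwd ((r.take j).reverse) : Nat) : Int))
            else none)) := by
  induction idxs generalizing acc with
  | nil => simp
  | cons j rest ih =>
    by_cases h : r.getD j "" = "HWY"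
    · have hstep : List.filterMap
          (fun j => if r.getD j "" = "HWY"
            then some (((pvFwd (r.drop j) + pvFwd ((r.take j).reverse) : Nat) : Int))
            else none) (j :: rest)
          = (((pvFwd (r.drop j) + pvFwd ((r.take j).reverse) : Nat) : Int)) ::
            List.filterMap
              (fun j => if r.getD j "" = "HWY"
                then some (((pvFwd (r.drop j) + pvFwd ((r.take j).reverse) : Nat) : Int))
                else none) rest :=
        List.filterMap_cons_some (by rw [if_pos h])
      simp only [List.foldl_cons, if_pos h, ih, hstep, List.sum_cons]
      simp [Prod.ext_iff, add_assoc]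
    · have hstep : List.filterMap
          (fun j => if r.getD j "" = "HWY"
            then some (((pvFwd (r.drop j) + pvFwd ((r.take j).reverse) : Nat) : Int))
            else none) (j :: rest)
          = List.filterMap
              (fun j => if r.getD j "" = "HWY"
                then some (((pvFwd (r.drop j) + pvFwd ((r.take j).reverse) : Nat) : Int))
                else none) rest :=
        List.filterMap_cons_none (by rw [if_neg h])
      simp only [List.foldl_cons, if_neg h, ih, hstep]

theorem pvFilterMap_pvG (r : List String) :
    (List.range r.length).filterMap
      (fun j => if r.getD j "" = "HWY"
        then some (((pvFwd (r.drop j) + pvFwd ((r.take j).reverse) : Nat) : Int))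
        else none)
    = pvG 0 r := by
  unfold pvG
  apply List.filterMap_congr
  intro j _
  by_cases h : r.getD j "" = "HWY"
  · rw [if_pos h, if_pos h]
    congr 2
    simp [pvSc]
  · rw [if_neg h, if_neg h]

-- B's inner fold with pending-run state, against the run decomposition pvRowB
theorem pvRepl (k : Nat) (p : Int × List Int) (run : Nat) :
    (List.replicate k "HWY").foldl pvStep (p, run) = (p, run + k) := by
  induction k generalizing run with
  | zero => simp
  | succ m ih =>
    rw [List.replicate_succ, List.foldl_cons]
    have hs : pvStep (p, run) "HWY" = (p, run + 1) := by simp [pvStep]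
    rw [hs, ih]
    congr 1
    omega

theorem pvFoldB : ∀ (n : Nat) (row : List String), row.length ≤ n → ∀ p : Int × List Int,
    pvFlush (row.foldl pvStep (p, 0)) = (p.1 + (pvRowB row).1, p.2 ++ (pvRowB row).2) := by
  intro n
  induction n with
  | zero =>
    intro row h p
    have : row = [] := List.eq_nil_of_length_eq_zero (Nat.le_zero.mp h)
    subst this
    simp [pvFlush, pvRowB]
  | succ n ih =>
    intro row h p
    cases row with
    | nil => simp [pvFlush, pvRowB]
    | cons x xs =>
      have hxs : xs.length ≤ n := by simp only [List.length_cons] at h; omega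
      by_cases hx : x = "HWY"
      · subst hx
        obtain ⟨hdec, hrest⟩ := pvSpan_decomp xs
        have hrow : ("HWY" : String) :: xs
            = List.replicate ((pvSpan xs).1 + 1) "HWY" ++ (pvSpan xs).2 := by
          rw [List.replicate_succ, List.cons_append]; exact congrArg _ hdec
        conv_lhs => rw [hrow]
        rw [List.foldl_append, pvRepl]
        simp only [pvRowB, if_true]
        rcases hrest with hnil | ⟨y, ys, hys, hy⟩
        · rw [hnil]
          simp [pvFlush, pvRowB]
        · rw [hys, List.foldl_cons]
          have hstep : pvStep (p, 0 + ((pvSpan xs).1 + 1)) y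
              = ((p.1 + ((((pvSpan xs).1 + 1) * ((pvSpan xs).1 + 1) : Nat) : Int),
                  p.2 ++ List.replicate ((pvSpan xs).1 + 1) (((pvSpan xs).1 + 1 : Nat) : Int)), 0) := by
            simp [pvStep, hy]
          have hys_len : ys.length ≤ n := by
            have h1 := pvSpan_len_le xs
            rw [hys] at h1
            simp only [List.length_cons] at h1
            omega
          rw [hstep, ih ys hys_len _]
          simp only [pvRowB]
          rw [if_neg hy]
          simp [add_assoc]
      · rw [List.foldl_cons]
        have hstep : pvStep (p, 0) x = (p, 0) := by simp [pvStep, hx]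
        rw [hstep, ih xs hxs p, pvRowB, if_neg hx]

-- ===== VERDICT (by name: the statement is the Claim_ definition above) =====
theorem calculate_hwy_score_spec : Claim_equal_calculate_hwy_score := by
  intro bt _
  unfold Spec_calculate_hwy_score calculate_hwy_score calculate_hwy_score_alt
  congr 1
  funext acc row
  rw [pvFoldRow, pvFilterMap_pvG, ← pvRowB_snd, ← pvRowB_fst]
  exact (pvFoldB row.length row le_rfl acc).symm
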